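-- pv_equiv track=rewrite | github.com/Count-group/project1 | results/codes/算法竞赛/doubao/CF2066B_2.py | find_max_magical_subsequence_length
-- ===== SOURCE A (Python) =====
-- def find_max_magical_subsequence_length(arr):
--     n = len(arr)
--     max_length = 0
--     from itertools import combinations
--     for r in range(n, 0, -1):
--         for subseq in combinations(arr, r):
--             is_magical = True
--             for i in range(len(subseq) - 1):
--                 left_min = min(subseq[:i + 1])
--                 right_nums = subseq[i + 1:]
--                 mex = 0
--                 while mex in right_nums:
--                     mex += 1
--                 if left_min < mex:
--                     is_magical = False
--                     break
--             if is_magical: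
--                 return r
--     return 1
-- ===== SOURCE B (Python) =====
-- # Alternative exact re-implementation: one recursive powerset enumeration with an
-- # incremental prefix-min / set-based suffix-mex check and a running maximum, instead of
-- # per-length itertools.combinations with slicing-based rechecks and early return.
-- # Intended difference: on the empty list A falls through to 1; B returns 0 (no subsequence).
-- def find_max_magical_subsequence_length(arr):
--     def mex(xs):
--         seen = set(xs)
--         m = 0
--         while m in seen:
--             m += 1
--         return m
--
--     def magical(s):
--         pm = s[0]
--         tail = s[1:]
--         while tail:
--             if pm < mex(tail):
--                 return False
--             pm = min(pm, tail[0])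
--             tail = tail[1:]
--         return True
--
--     def subseqs(xs):
--         if not xs:
--             return [[]]
--         rest = subseqs(xs[1:])
--         return rest + [[xs[0]] + s for s in rest]
--
--     best = 0
--     for s in subseqs(arr):
--         if s and magical(s):
--             best = max(best, len(s))
--     return best
-- ===== Notes on version B (the rewrite author's own statement) =====
-- stated objective: alternative
-- what changed: One recursive powerset enumeration with a running maximum and an incremental prefix-min / set-based suffix-mex check replaces A's per-length itertools.combinations scans with slicing-based min/mex rechecks and early return.
-- intended difference: On the empty list A's loop never runs and it falls through to return 1; B returns 0, the length of the longest (empty) magical subsequence, which is the intended value. — e.g. on find_max_magical_subsequence_length([]): A returns 1, B returns 0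
import Mathlib
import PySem

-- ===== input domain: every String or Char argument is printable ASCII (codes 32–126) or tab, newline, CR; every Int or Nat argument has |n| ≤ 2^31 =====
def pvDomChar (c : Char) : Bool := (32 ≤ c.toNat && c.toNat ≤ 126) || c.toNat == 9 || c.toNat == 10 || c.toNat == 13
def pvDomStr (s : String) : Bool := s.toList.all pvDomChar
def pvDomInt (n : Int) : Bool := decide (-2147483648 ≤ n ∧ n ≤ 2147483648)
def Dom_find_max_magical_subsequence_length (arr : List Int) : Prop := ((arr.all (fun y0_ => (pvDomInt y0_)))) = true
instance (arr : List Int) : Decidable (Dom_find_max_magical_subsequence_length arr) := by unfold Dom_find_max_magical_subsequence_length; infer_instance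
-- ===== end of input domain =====

-- B replaces A's per-length combinations scan (with slicing rechecks and early return) by one
-- recursive powerset enumeration with an incremental prefix-min / set-based suffix-mex check and
-- a running maximum; on the empty list A falls through to 1 while B returns 0 (stated as D_).

-- ===== PORT A =====

-- the while loop 'mex = 0; while mex in right_nums: mex += 1'; fuel length+1 suffices because the
-- len+1 distinct values 0..len cannot all be members of a list of len elements
def pvMexLoopA : Nat → Int → List Int → Int
  | 0, m, _ => m
  | f+1, m, r => if m ∈ r then pvMexLoopA f (m+1) r else m

def pvMexA (right : List Int) : Int := pvMexLoopA (right.length + 1) 0 right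

-- min(subseq[:i+1]); the slice is always nonempty in A, so the none branch is unreachable
def pvMinD (xs : List Int) : Int :=
  match PySem.List.min? xs (fun y => y) with
  | some m => m
  | none => 0

-- 'for i in range(len(subseq)-1): … if left_min < mex: is_magical = False; break'
-- (a break-on-false flag loop is List.all); subseq[:i+1] = take (i+1), subseq[i+1:] = drop (i+1)
def pvMagicalA (s : List Int) : Bool :=
  (List.range (s.length - 1)).all fun i =>
    !decide (pvMinD (s.take (i+1)) < pvMexA (s.drop (i+1)))

-- itertools.combinations(arr, r), in its order (indices lexicographic)
def pvCombosA : Nat → List Int → List (List Int)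
  | 0, _ => [[]]
  | _+1, [] => []
  | r+1, x::xs => (pvCombosA r xs).map (fun t => x :: t) ++ pvCombosA (r+1) xs

-- range(n, 0, -1) = [n, n-1, …, 1]
def pvDescList : Nat → List Nat
  | 0 => []
  | n+1 => (n+1) :: pvDescList n

-- 'for r in …: for subseq in combinations(arr, r): … if is_magical: return r' then 'return 1'
def pvALoop (arr : List Int) : List Nat → Int
  | [] => 1
  | r :: rs => if (pvCombosA r arr).any pvMagicalA then (r : Int) else pvALoop arr rs

def find_max_magical_subsequence_length (arr : List Int) : Int :=
  pvALoop arr (pvDescList arr.length)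

-- ===== PORT B =====

-- B's mex: 'seen = set(xs); m = 0; while m in seen: m += 1' (same fuel bound as A's loop)
def pvMexLoopAlt : Nat → Int → PySem.Set Int → Int
  | 0, m, _ => m
  | f+1, m, seen => if m ∈ seen then pvMexLoopAlt f (m+1) seen else m

def pvMexAlt (xs : List Int) : Int := pvMexLoopAlt (xs.length + 1) 0 (PySem.Set.ofList xs)

-- B's 'while tail: if pm < mex(tail): return False; pm = min(pm, tail[0]); tail = tail[1:]'
def pvMagAlt : Int → List Int → Bool
  | _, [] => true
  | pm, t :: ts => if pm < pvMexAlt (t :: ts) then false else pvMagAlt (min pm t) ts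

-- 'pm = s[0]; tail = s[1:]'; B only calls this on nonempty s ('if s and magical(s)'), the [] value is never used
def pvMagicalAlt : List Int → Bool
  | [] => true
  | x :: xs => pvMagAlt x xs

-- 'rest = subseqs(xs[1:]); return rest + [[xs[0]] + s for s in rest]'
def pvSubsAlt : List Int → List (List Int)
  | [] => [[]]
  | x :: xs => pvSubsAlt xs ++ (pvSubsAlt xs).map (fun s => x :: s)

def find_max_magical_subsequence_length_alt (arr : List Int) : Int :=
  (pvSubsAlt arr).foldl
    (fun b s => if !s.isEmpty && pvMagicalAlt s then max b (s.length : Int) else b) 0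

-- ===== PRECONDITION & SPEC =====

-- On the empty list A's loop body never runs and A falls through to 1; B returns 0, the length of
-- the longest (empty) choice of subsequence, which is the intended value.
def D_find_max_magical_subsequence_length (arr : List Int) : Prop := arr = []
instance (arr : List Int) : Decidable (D_find_max_magical_subsequence_length arr) := by
  unfold D_find_max_magical_subsequence_length; infer_instance

def Spec_find_max_magical_subsequence_length (arr : List Int) (out : Int) : Prop :=
  ¬ D_find_max_magical_subsequence_length arr → out = find_max_magical_subsequence_length_alt arr
instance (arr : List Int) (out : Int) : Decidable (Spec_find_max_magical_subsequence_length arr out) := by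
  unfold Spec_find_max_magical_subsequence_length; infer_instance

def pvDiffWitness_find_max_magical_subsequence_length : List Int := []
def pvDiffWitnessOut_find_max_magical_subsequence_length : Int × Int := (1, 0)

-- ===== CLAIM =====

def Claim_unchanged_find_max_magical_subsequence_length : Prop :=
  ∀ (arr : List Int), Dom_find_max_magical_subsequence_length arr →
    Spec_find_max_magical_subsequence_length arr (find_max_magical_subsequence_length arr)

def Claim_changed_find_max_magical_subsequence_length : Prop :=
  Dom_find_max_magical_subsequence_length (pvDiffWitness_find_max_magical_subsequence_length) ∧
  D_find_max_magical_subsequence_length (pvDiffWitness_find_max_magical_subsequence_length) ∧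
  find_max_magical_subsequence_length (pvDiffWitness_find_max_magical_subsequence_length) = pvDiffWitnessOut_find_max_magical_subsequence_length.1 ∧
  find_max_magical_subsequence_length_alt (pvDiffWitness_find_max_magical_subsequence_length) = pvDiffWitnessOut_find_max_magical_subsequence_length.2 ∧
  pvDiffWitnessOut_find_max_magical_subsequence_length.1 ≠ pvDiffWitnessOut_find_max_magical_subsequence_length.2

def Claim_exact_find_max_magical_subsequence_length : Prop :=
  ∀ (arr : List Int), Dom_find_max_magical_subsequence_length arr →
    D_find_max_magical_subsequence_length arr →
    find_max_magical_subsequence_length arr ≠ find_max_magical_subsequence_length_alt arr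

-- ===== LEMMAS AND PROOFS =====

-- the two mex loops agree (same fuel, membership in the list vs in set(list))
theorem pvMexLoop_eq (f : Nat) (m : Int) (xs : List Int) :
    pvMexLoopA f m xs = pvMexLoopAlt f m (PySem.Set.ofList xs) := by
  induction f generalizing m with
  | zero => rfl
  | succ f ih =>
    rw [pvMexLoopA, pvMexLoopAlt]
    by_cases h : m ∈ xs
    · rw [if_pos h, if_pos ((PySem.Set.mem_ofList xs m).mpr h), ih]
    · rw [if_neg h, if_neg (fun hc => h ((PySem.Set.mem_ofList xs m).mp hc))]

theorem pvMex_eq (xs : List Int) : pvMexA xs = pvMexAlt xs := pvMexLoop_eq _ _ _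

-- B's incremental check equals A's index loop, with pm the running prefix minimum
theorem pvMagAlt_eq_all (ts : List Int) (pm : Int) :
    pvMagAlt pm ts =
      (List.range ts.length).all
        (fun i => !decide ((ts.take i).foldl min pm < pvMexA (ts.drop i))) := by
  induction ts generalizing pm with
  | nil => rfl
  | cons t ts ih =>
    rw [pvMagAlt, List.length_cons, List.range_succ_eq_map, List.all_cons, List.all_map]
    have h0 : ∀ i : Nat,
        ((t :: ts).take (Nat.succ i)).foldl min pm = (ts.take i).foldl min (min pm t) := by
      intro i; rfl
    have h1 : ∀ i : Nat, (t :: ts).drop (i + 1) = ts.drop i := fun _ => rfl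
    simp only [Function.comp_def, Nat.succ_eq_add_one, h0, h1, List.take_zero,
      List.foldl_nil, List.drop_zero]
    rw [← ih (min pm t)]
    have hm := pvMex_eq (t :: ts)
    by_cases h : pm < pvMexAlt (t :: ts)
    · rw [if_pos h]; simp [hm, h]
    · rw [if_neg h]; simp [hm, h]

theorem pvMagical_eq (s : List Int) : pvMagicalA s = pvMagicalAlt s := by
  cases s with
  | nil => rfl
  | cons x xs =>
    rw [pvMagicalAlt, pvMagAlt_eq_all]
    unfold pvMagicalA
    simp only [List.length_cons, Nat.add_sub_cancel]
    refine List.all_congr rfl ?_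
    intro i
    have ht : (x :: xs).take (i + 1) = x :: xs.take i := rfl
    have hd : (x :: xs).drop (i + 1) = xs.drop i := rfl
    rw [ht, hd]
    have hm : pvMinD (x :: xs.take i) = (xs.take i).foldl min x := by
      unfold pvMinD; rw [PySem.List.min?_id_cons]
    rw [hm]

-- membership in combinations(arr, r): sublists of length r
theorem pvCombos_mem (l : List Int) :
    ∀ (r : Nat) (s : List Int), s ∈ pvCombosA r l ↔ s.length = r ∧ List.Sublist s l := by
  induction l with
  | nil =>
    intro r s
    cases r with
    | zero => simp [pvCombosA, List.length_eq_zero_iff]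
    | succ r =>
      simp only [pvCombosA, List.not_mem_nil, false_iff]
      rintro ⟨hl, hs⟩
      rw [List.sublist_nil] at hs
      subst hs; simp at hl
  | cons x xs ih =>
    intro r s
    cases r with
    | zero =>
      simp only [pvCombosA, List.mem_singleton]
      constructor
      · rintro rfl; exact ⟨rfl, List.nil_sublist _⟩
      · rintro ⟨hl, _⟩; exact List.length_eq_zero_iff.mp hl
    | succ r =>
      simp only [pvCombosA, List.mem_append, List.mem_map, ih]
      rw [List.sublist_cons_iff]
      constructor
      · rintro (⟨t, ⟨hlen, hsub⟩, rfl⟩ | ⟨hlen, hsub⟩)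
        · exact ⟨by simp [hlen], Or.inr ⟨t, rfl, hsub⟩⟩
        · exact ⟨hlen, Or.inl hsub⟩
      · rintro ⟨hlen, (hsub | ⟨t, rfl, hsub⟩)⟩
        · exact Or.inr ⟨hlen, hsub⟩
        · exact Or.inl ⟨t, ⟨by simpa using hlen, hsub⟩, rfl⟩

-- membership in B's powerset
theorem pvSubs_mem (l : List Int) :
    ∀ s : List Int, s ∈ pvSubsAlt l ↔ List.Sublist s l := by
  induction l with
  | nil => intro s; simp [pvSubsAlt, List.sublist_nil]
  | cons x xs ih =>
    intro s
    simp only [pvSubsAlt, List.mem_append, List.mem_map, ih, List.sublist_cons_iff]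
    constructor
    · rintro (h | ⟨t, ht, rfl⟩)
      · exact Or.inl h
      · exact Or.inr ⟨t, rfl, ht⟩
    · rintro (h | ⟨t, rfl, ht⟩)
      · exact Or.inl h
      · exact Or.inr ⟨t, ht, rfl⟩

-- B's fold step
def pvStep (b : Int) (s : List Int) : Int :=
  if !s.isEmpty && pvMagicalAlt s then max b (s.length : Int) else b

theorem pvStep_ge (b : Int) (s : List Int) : b ≤ pvStep b s := by
  unfold pvStep; split
  · exact le_max_left _ _
  · exact le_refl _

theorem pvFold_ge_init (L : List (List Int)) (b : Int) : b ≤ L.foldl pvStep b := by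
  induction L generalizing b with
  | nil => exact le_refl _
  | cons s L ih => exact le_trans (pvStep_ge b s) (ih _)

theorem pvCond_true (s : List Int) (hne : s ≠ []) (hmag : pvMagicalAlt s = true) :
    (!s.isEmpty && pvMagicalAlt s) = true := by
  have hE : s.isEmpty = false := List.isEmpty_eq_false_iff.mpr hne
  rw [hE, hmag]; rfl

theorem pvFold_ge_mem (L : List (List Int)) (b : Int) (s : List Int)
    (hmem : s ∈ L) (hne : s ≠ []) (hmag : pvMagicalAlt s = true) :
    (s.length : Int) ≤ L.foldl pvStep b := by
  induction L generalizing b with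
  | nil => cases hmem
  | cons t L ih =>
    rcases List.mem_cons.mp hmem with rfl | hmem'
    · refine le_trans ?_ (pvFold_ge_init L (pvStep b s))
      unfold pvStep
      rw [if_pos (pvCond_true s hne hmag)]
      exact le_max_right _ _
    · exact ih _ hmem'

theorem pvFold_cases (L : List (List Int)) (b : Int) :
    L.foldl pvStep b = b ∨
      ∃ s ∈ L, s ≠ [] ∧ pvMagicalAlt s = true ∧ L.foldl pvStep b = (s.length : Int) := by
  induction L generalizing b with
  | nil => exact Or.inl rfl
  | cons t L ih =>
    rw [List.foldl_cons]
    rcases ih (pvStep b t) with h | ⟨s, hmem, hne, hmag, hval⟩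
    · rw [h]
      unfold pvStep
      by_cases hc : (!t.isEmpty && pvMagicalAlt t) = true
      · rw [if_pos hc]
        rcases max_choice b (t.length : Int) with hm | hm
        · exact Or.inl hm
        · refine Or.inr ⟨t, List.mem_cons_self, ?_, Bool.and_elim_right hc, hm⟩
          have := Bool.and_elim_left hc
          rw [Bool.not_eq_true'] at this
          exact fun hnil => by simp [hnil] at this
      · rw [if_neg hc]; exact Or.inl rfl
    · exact Or.inr ⟨s, List.mem_cons_of_mem _ hmem, hne, hmag, hval⟩

-- Q r: some combination of length r is magical (A's inner 'any')
def pvQ (arr : List Int) (r : Nat) : Prop := (pvCombosA r arr).any pvMagicalA = true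

theorem pvALoop_eq (arr : List Int) (R : Nat) :
    ∀ n : Nat, 1 ≤ R → R ≤ n → pvQ arr R → (∀ r, R < r → r ≤ n → ¬ pvQ arr r) →
      pvALoop arr (pvDescList n) = (R : Int) := by
  intro n
  induction n with
  | zero => intro h1 h2 _ _; omega
  | succ n ih =>
    intro h1 h2 hQ hnot
    rw [pvDescList, pvALoop]
    by_cases hR : R = n + 1
    · subst hR
      rw [if_pos (show (pvCombosA (n+1) arr).any pvMagicalA = true from hQ)]
    · have hRn : R ≤ n := by omega
      have hnQ : ¬ pvQ arr (n + 1) := hnot (n + 1) (by omega) (le_refl _)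
      rw [if_neg (show ¬ ((pvCombosA (n+1) arr).any pvMagicalA = true) from hnQ)]
      exact ih h1 hRn hQ (fun r hr hrn => hnot r hr (by omega))

-- ===== VERDICT =====

theorem find_max_magical_subsequence_length_spec :
    Claim_unchanged_find_max_magical_subsequence_length := by
  intro arr _ hD
  have hne : arr ≠ [] := hD
  obtain ⟨x, xs, rfl⟩ : ∃ y ys, arr = y :: ys := by
    cases arr with
    | nil => exact absurd rfl hne
    | cons y ys => exact ⟨y, ys, rfl⟩
  set arr := x :: xs with harr
  have halt : find_max_magical_subsequence_length_alt arr
      = (pvSubsAlt arr).foldl pvStep 0 := rfl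
  -- the singleton [x] is a qualified subsequence of length 1
  have hx_mem : [x] ∈ pvSubsAlt arr :=
    (pvSubs_mem arr [x]).mpr ((List.nil_sublist xs).cons₂ x)
  have hx_mag : pvMagicalAlt [x] = true := rfl
  have h1le : (1 : Int) ≤ (pvSubsAlt arr).foldl pvStep 0 := by
    have := pvFold_ge_mem (pvSubsAlt arr) 0 [x] hx_mem (by simp) hx_mag
    simpa using this
  -- B's result is the length of some qualified subsequence s0
  rcases pvFold_cases (pvSubsAlt arr) 0 with h0 | ⟨s0, hmem, hne0, hmag0, hval⟩
  · rw [h0] at h1le; exact absurd h1le (by norm_num)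
  · have hsub0 : List.Sublist s0 arr := (pvSubs_mem arr s0).mp hmem
    have hQ : pvQ arr s0.length := by
      unfold pvQ
      rw [List.any_eq_true]
      exact ⟨s0, (pvCombos_mem arr s0.length s0).mpr ⟨rfl, hsub0⟩,
        by rw [pvMagical_eq]; exact hmag0⟩
    have h1R : 1 ≤ s0.length := by
      cases s0 with
      | nil => exact absurd rfl hne0
      | cons _ _ => simp
    have hRn : s0.length ≤ arr.length := hsub0.length_le
    have hnot : ∀ r, s0.length < r → r ≤ arr.length → ¬ pvQ arr r := by
      intro r hr _ hQr
      unfold pvQ at hQr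
      rw [List.any_eq_true] at hQr
      obtain ⟨s, hsmem, hsmag⟩ := hQr
      obtain ⟨hslen, hssub⟩ := (pvCombos_mem arr r s).mp hsmem
      have hsne : s ≠ [] := by
        intro hnil; rw [hnil] at hslen; simp at hslen; omega
      have hsmag' : pvMagicalAlt s = true := by rw [← pvMagical_eq]; exact hsmag
      have := pvFold_ge_mem (pvSubsAlt arr) 0 s ((pvSubs_mem arr s).mpr hssub) hsne hsmag'
      rw [hslen, hval] at this
      have : (r : Int) ≤ (s0.length : Int) := this
      omega
    have hA : find_max_magical_subsequence_length arr = (s0.length : Int) := by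
      unfold find_max_magical_subsequence_length
      exact pvALoop_eq arr s0.length arr.length h1R hRn hQ hnot
    rw [hA, halt, hval]

theorem find_max_magical_subsequence_length_changed :
    Claim_changed_find_max_magical_subsequence_length := by
  unfold Claim_changed_find_max_magical_subsequence_length; decide

theorem find_max_magical_subsequence_length_tight :
    Claim_exact_find_max_magical_subsequence_length := by
  intro arr _ hD
  rw [hD]
  decide
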